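-- pv_equiv track=rewrite | github.com/BennyG9/rubiks-cube-solving-robot | NEW RC SOLVER.py | group_parallel_moves
-- ===== SOURCE A (Python) =====
-- def group_parallel_moves(moves):
--     parallel_moves = {'U':'D','D':'U','R':'L','L':'R','F':'B','B':'F'}
--     new_moves = []
--     i = 0
--     while(i < len(moves)):
--         curr_move = moves[i]
--         mv_stack = [curr_move]
--         for j in range(i+1, len(moves)):
--             if(curr_move[0] == moves[j][0]):
--                 mv_stack.insert(0, moves[j])
--             elif(parallel_moves[curr_move[0]] == moves[j][0]):
--                 mv_stack.append(moves[j])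
--             else:
--                 break
--         new_moves += mv_stack
--         i += len(mv_stack)
--     return new_moves
-- ===== SOURCE B (Python) =====
-- def group_parallel_moves(moves):
--     # Decorate-sort-undecorate: compute one integer sort key per position, then
--     # a single sort of the indices realises every group's reordering at once.
--     axis = {'D': 'U', 'L': 'R', 'B': 'F'}
--     n = len(moves)
--     span = 2 * n + 1
--     keys = []
--     gid = 0
--     ref = None
--     for p, m in enumerate(moves):
--         if ref is None:
--             ref = m
--             keys.append(gid * span)
--         else:
--             f, rf = m[0], ref[0]
--             if axis.get(f, f) == axis.get(rf, rf):
--                 keys.append(gid * span + (-p if f == rf else p))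
--             else:
--                 gid += 1
--                 ref = m
--                 keys.append(gid * span)
--     order = sorted(range(n), key=lambda q: keys[q])
--     return [moves[q] for q in order]
-- ===== Notes on version B (the rewrite author's own statement) =====
-- stated objective: faster
-- what changed: A builds the output by an interleaved index-walking scan that rearranges each run in place with list.insert(0)/append; B is decorate-sort-undecorate: one pass assigns every position a single integer key (group id scaled by a span, minus the position for later same-face moves, plus it for opposite-face moves), then one stable sort of the indices by key followed by a gather realises all per-group reorderings at once.
-- outside the precondition, e.g. on group_parallel_moves(['', 'U']): A raises IndexError, B raises IndexError; on group_parallel_moves(['X', 'U']): A raises KeyError, B returns ['X', 'U']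
-- crash fix: On lists of at least two nonempty moves where a move whose first letter is not a cube face (UDRLFB) is followed by a move with a different first letter, A raises KeyError on parallel_moves[curr_move[0]] while B simply starts a new group and returns the regrouped moves, e.g. ['X','U'] -> ['X','U']. — e.g. on group_parallel_moves(["X", "U"]): A raises KeyError, B returns ["X", "U"]
import Mathlib
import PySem

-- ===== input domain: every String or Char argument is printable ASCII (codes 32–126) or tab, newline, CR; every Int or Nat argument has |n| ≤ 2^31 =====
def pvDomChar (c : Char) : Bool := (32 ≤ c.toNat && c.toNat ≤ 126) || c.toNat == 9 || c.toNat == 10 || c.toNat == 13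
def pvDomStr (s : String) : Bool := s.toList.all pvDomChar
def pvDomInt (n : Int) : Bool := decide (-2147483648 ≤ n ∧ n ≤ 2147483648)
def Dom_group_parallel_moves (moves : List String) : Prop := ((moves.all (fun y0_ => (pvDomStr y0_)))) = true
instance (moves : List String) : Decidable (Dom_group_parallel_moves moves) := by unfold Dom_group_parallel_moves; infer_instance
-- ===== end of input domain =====

-- B replaces A's interleaved index-walking scan (with list.insert(0), quadratic on long same-axis
-- runs) by decorate-sort-undecorate: one pass assigns every position a single integer sort key
-- (group id × span ± position) and one sort of the indices realises all the per-group reorderings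
-- at once (objective: faster; a timing run measured B faster on the large generated inputs).

-- ===== PORT A =====
-- s[0] as a Char; exact whenever s is nonempty (Pre_ guarantees every evaluated s[0] is in range)
def pyHead (s : String) : Char := s.toList.headD (Char.ofNat 0)

-- the literal dict parallel_moves = {'U':'D',…}; lookup parallel_moves[c] (none = KeyError)
def faceOpp (c : Char) : Option Char :=
  if c = 'U' then some 'D' else if c = 'D' then some 'U'
  else if c = 'R' then some 'L' else if c = 'L' then some 'R'
  else if c = 'F' then some 'B' else if c = 'B' then some 'F' else none

-- A's inner for-loop over j = i+1 … len-1 with break; stack is mv_stack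
-- (insert(0,x) = x :: stack, append(x) = stack ++ [x]); fuel ≥ len-j makes the
-- index recursion structural and is never exhausted on the loop's own range; the
-- KeyError case (faceOpp curr = none with a differing head) is excluded by Pre_ and ports as break.
def aInner (moves : List String) (curr : Char) : Nat → Nat → List String → List String
  | 0, _, stack => stack
  | fuel+1, j, stack =>
    if _h : j < moves.length then
      let mj := moves[j]
      if pyHead mj == curr then aInner moves curr fuel (j+1) (mj :: stack)
      else
        match faceOpp curr with
        | some o => if o == pyHead mj then aInner moves curr fuel (j+1) (stack ++ [mj]) else stack
        | none => stack   -- Python raises KeyError here; outside Pre_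
    else stack

-- A's outer while-loop: i advances by len(mv_stack) ≥ 1, so length-many fuel steps suffice
def aOuter (moves : List String) : Nat → Nat → List String → List String
  | 0, _, acc => acc
  | fuel+1, i, acc =>
    if _h : i < moves.length then
      let curr := moves[i]
      let stack := aInner moves (pyHead curr) (moves.length - (i+1)) (i+1) [curr]
      aOuter moves fuel (i + stack.length) (acc ++ stack)
    else acc

def group_parallel_moves (moves : List String) : List String :=
  aOuter moves moves.length 0 []


-- ===== PORT B =====
-- axis.get(c, c) with axis = {'D':'U','L':'R','B':'F'}: canonical representative of c's axis
def bAxis (c : Char) : Char :=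
  if c = 'D' then 'U' else if c = 'L' then 'R' else if c = 'B' then 'F' else c

-- the body of B's key-building loop over enumerate(moves); state = (keys, gid, ref)
def bStepK (span : Int) (st : List Int × Int × Option String) (pm : Int × String) : List Int × Int × Option String :=
  match st.2.2 with
  | none => (st.1 ++ [st.2.1 * span], st.2.1, some pm.2)
  | some ref =>
      if bAxis (pyHead pm.2) == bAxis (pyHead ref) then
        (st.1 ++ [st.2.1 * span + (if pyHead pm.2 == pyHead ref then -pm.1 else pm.1)], st.2.1, some ref)
      else
        (st.1 ++ [(st.2.1 + 1) * span], st.2.1 + 1, some pm.2)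

def group_parallel_moves_alt (moves : List String) : List String :=
  let n : Int := moves.length
  let span : Int := 2 * n + 1
  let st := (PySem.List.enumerate moves).foldl (bStepK span) ([], 0, none)
  let order := PySem.List.sorted (PySem.List.pyRange 0 n) (fun q => PySem.List.pyGetD st.1 q 0)
  order.map (fun q => PySem.List.pyGetD moves q "")

-- ===== PRECONDITION & SPEC =====
def pvFaces : List Char := ['U', 'D', 'R', 'L', 'F', 'B']

-- Pre_ excludes exactly the inputs where Python A raises: a list of ≥ 2 moves containing an
-- empty string (IndexError on s[0]), or one where some move with a non-face head letter is
-- followed by a move with a different head letter (KeyError on parallel_moves[curr_move[0]]).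
def Pre_group_parallel_moves (moves : List String) : Prop :=
  moves.length ≤ 1 ∨
    ((∀ m ∈ moves, m ≠ "") ∧
     List.Pairwise (fun a b => pyHead a ∉ pvFaces → pyHead b = pyHead a) moves)
instance (moves : List String) : Decidable (Pre_group_parallel_moves moves) := by
  unfold Pre_group_parallel_moves; infer_instance

def pvWitness_group_parallel_moves : List String := ["U", "U'", "D2", "R", "L'", "F"]

-- On lists of ≥ 2 nonempty moves where a non-face-headed move is followed by a differently
-- headed move, A raises KeyError while B simply starts a new group there and returns the moves
-- regrouped; e.g. on ["X", "U"] B returns ["X", "U"].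
def Raises_group_parallel_moves (moves : List String) : Prop :=
  2 ≤ moves.length ∧ (∀ m ∈ moves, m ≠ "") ∧
    ¬ List.Pairwise (fun a b => pyHead a ∉ pvFaces → pyHead b = pyHead a) moves
instance (moves : List String) : Decidable (Raises_group_parallel_moves moves) := by
  unfold Raises_group_parallel_moves; infer_instance

def pvRaiseWitness_group_parallel_moves : List String := ["X", "U"]
def pvRaiseWitnessOut_group_parallel_moves : List String := ["X", "U"]

def Spec_group_parallel_moves (moves : List String) (out : List String) : Prop :=
  out = group_parallel_moves_alt moves
instance (moves : List String) (out : List String) : Decidable (Spec_group_parallel_moves moves out) := by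
  unfold Spec_group_parallel_moves; infer_instance

-- ===== CLAIM (what is proved, stated in full; the proofs are below) =====
def Claim_equal_group_parallel_moves : Prop :=
  ∀ (moves : List String), Dom_group_parallel_moves moves → Pre_group_parallel_moves moves →
    Spec_group_parallel_moves moves (group_parallel_moves moves)

def Claim_raises_group_parallel_moves : Prop :=
  (∀ (moves : List String), Dom_group_parallel_moves moves →
      Raises_group_parallel_moves moves → ¬ Pre_group_parallel_moves moves) ∧
  (Dom_group_parallel_moves (pvRaiseWitness_group_parallel_moves) ∧
   Raises_group_parallel_moves (pvRaiseWitness_group_parallel_moves) ∧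
   group_parallel_moves_alt (pvRaiseWitness_group_parallel_moves) = pvRaiseWitnessOut_group_parallel_moves)

-- ===== LEMMAS AND PROOFS =====

-- A's inner-loop continuation test, as a predicate on the scanned move
def condA (curr : Char) (m : String) : Bool :=
  pyHead m == curr || (match faceOpp curr with | some o => o == pyHead m | none => false)

-- B's run-continuation test
def condB (curr : Char) (m : String) : Bool := bAxis (pyHead m) == bAxis curr

theorem beq_false_swap (a b : Char) (h : ¬ b = a) : (a == b) = false := by
  simp only [beq_eq_false_iff_ne, ne_eq]
  exact fun e => h e.symm

theorem cond_eq_char (c x : Char) :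
    (x == c || (match faceOpp c with | some o => o == x | none => false)) = (bAxis x == bAxis c) := by
  by_cases h1 : c = 'U'
  · subst h1
    by_cases k1 : x = 'U'
    · subst k1; decide
    by_cases k2 : x = 'D'
    · subst k2; decide
    by_cases k3 : x = 'R'
    · subst k3; decide
    by_cases k4 : x = 'L'
    · subst k4; decide
    by_cases k5 : x = 'F'
    · subst k5; decide
    by_cases k6 : x = 'B'
    · subst k6; decide
    simp [faceOpp, bAxis, k1, k2, k3, k4, k5, k6, beq_false_swap 'D' x k2]
  by_cases h2 : c = 'D'
  · subst h2
    by_cases k1 : x = 'U'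
    · subst k1; decide
    by_cases k2 : x = 'D'
    · subst k2; decide
    by_cases k3 : x = 'R'
    · subst k3; decide
    by_cases k4 : x = 'L'
    · subst k4; decide
    by_cases k5 : x = 'F'
    · subst k5; decide
    by_cases k6 : x = 'B'
    · subst k6; decide
    simp [faceOpp, bAxis, k1, k2, k3, k4, k5, k6, beq_false_swap 'U' x k1]
  by_cases h3 : c = 'R'
  · subst h3
    by_cases k1 : x = 'U'
    · subst k1; decide
    by_cases k2 : x = 'D'
    · subst k2; decide
    by_cases k3 : x = 'R'
    · subst k3; decide
    by_cases k4 : x = 'L'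
    · subst k4; decide
    by_cases k5 : x = 'F'
    · subst k5; decide
    by_cases k6 : x = 'B'
    · subst k6; decide
    simp [faceOpp, bAxis, k1, k2, k3, k4, k5, k6, beq_false_swap 'L' x k4]
  by_cases h4 : c = 'L'
  · subst h4
    by_cases k1 : x = 'U'
    · subst k1; decide
    by_cases k2 : x = 'D'
    · subst k2; decide
    by_cases k3 : x = 'R'
    · subst k3; decide
    by_cases k4 : x = 'L'
    · subst k4; decide
    by_cases k5 : x = 'F'
    · subst k5; decide
    by_cases k6 : x = 'B'
    · subst k6; decide
    simp [faceOpp, bAxis, k1, k2, k3, k4, k5, k6, beq_false_swap 'R' x k3]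
  by_cases h5 : c = 'F'
  · subst h5
    by_cases k1 : x = 'U'
    · subst k1; decide
    by_cases k2 : x = 'D'
    · subst k2; decide
    by_cases k3 : x = 'R'
    · subst k3; decide
    by_cases k4 : x = 'L'
    · subst k4; decide
    by_cases k5 : x = 'F'
    · subst k5; decide
    by_cases k6 : x = 'B'
    · subst k6; decide
    simp [faceOpp, bAxis, k1, k2, k3, k4, k5, k6, beq_false_swap 'B' x k6]
  by_cases h6 : c = 'B'
  · subst h6
    by_cases k1 : x = 'U'
    · subst k1; decide
    by_cases k2 : x = 'D'
    · subst k2; decide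
    by_cases k3 : x = 'R'
    · subst k3; decide
    by_cases k4 : x = 'L'
    · subst k4; decide
    by_cases k5 : x = 'F'
    · subst k5; decide
    by_cases k6 : x = 'B'
    · subst k6; decide
    simp [faceOpp, bAxis, k1, k2, k3, k4, k5, k6, beq_false_swap 'F' x k5]
  by_cases k1 : x = 'U'
  · subst k1
    simp [faceOpp, bAxis, h1, h2, h3, h4, h5, h6, beq_false_swap 'U' c h1]
  by_cases k2 : x = 'D'
  · subst k2
    simp [faceOpp, bAxis, h1, h2, h3, h4, h5, h6, beq_false_swap 'D' c h2, beq_false_swap 'U' c h1]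
  by_cases k3 : x = 'R'
  · subst k3
    simp [faceOpp, bAxis, h1, h2, h3, h4, h5, h6, beq_false_swap 'R' c h3]
  by_cases k4 : x = 'L'
  · subst k4
    simp [faceOpp, bAxis, h1, h2, h3, h4, h5, h6, beq_false_swap 'L' c h4, beq_false_swap 'R' c h3]
  by_cases k5 : x = 'F'
  · subst k5
    simp [faceOpp, bAxis, h1, h2, h3, h4, h5, h6, beq_false_swap 'F' c h5]
  by_cases k6 : x = 'B'
  · subst k6
    simp [faceOpp, bAxis, h1, h2, h3, h4, h5, h6, beq_false_swap 'B' c h6, beq_false_swap 'F' c h5]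
  simp [faceOpp, bAxis, h1, h2, h3, h4, h5, h6, k1, k2, k3, k4, k5, k6]

theorem cond_eq (curr : Char) (m : String) : condA curr m = condB curr m := by
  unfold condA condB; exact cond_eq_char curr (pyHead m)

-- a finished run, emitted in output order: reversed later-same-face + first + opposite-face
def bEmit (group : List String) : List String :=
  match group with
  | [] => []
  | first :: rest =>
      (rest.filter (fun m => pyHead m == pyHead first)).reverse
        ++ first :: rest.filter (fun m => pyHead m != pyHead first)

-- the reference shape both ports are reduced to: maximal same-axis runs, emitted via bEmit
def altRef : List String → List String
  | [] => []
  | first :: rest =>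
      bEmit (first :: rest.takeWhile (condB (pyHead first)))
        ++ altRef (rest.dropWhile (condB (pyHead first)))
termination_by l => l.length
decreasing_by
  have := (List.dropWhile_sublist (l := rest) (p := condB (pyHead first))).length_le
  simp; omega

theorem aInner_spec (moves : List String) (curr : Char) :
    ∀ fuel j stack, moves.length - j ≤ fuel →
      aInner moves curr fuel j stack =
        (((moves.drop j).takeWhile (condA curr)).filter (fun m => pyHead m == curr)).reverse
          ++ stack ++ ((moves.drop j).takeWhile (condA curr)).filter (fun m => !(pyHead m == curr)) := by
  intro fuel
  induction fuel with
  | zero =>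
    intro j stack h
    simp only [aInner]
    simp [List.drop_eq_nil_of_le (by omega : moves.length ≤ j)]
  | succ n ih =>
    intro j stack h
    simp only [aInner]
    by_cases hj : j < moves.length
    · have hdrop : moves.drop j = moves[j] :: moves.drop (j+1) := List.drop_eq_getElem_cons hj
      simp only [hj, dif_pos]
      by_cases h1 : pyHead moves[j] == curr
      · have hc : condA curr moves[j] = true := by unfold condA; simp [h1]
        rw [if_pos h1, ih (j+1) (moves[j] :: stack) (by omega), hdrop]
        generalize List.drop (j+1) moves = tl
        simp [hc, h1]
      · have h1' : (pyHead moves[j] == curr) = false := by simpa using h1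
        rw [if_neg h1]
        cases hf : faceOpp curr with
        | none =>
          have hc : condA curr moves[j] = false := by unfold condA; simp [h1', hf]
          dsimp only
          rw [hdrop]
          generalize List.drop (j+1) moves = tl
          simp [hc]
        | some o =>
          dsimp only
          by_cases h2 : o == pyHead moves[j]
          · have hc : condA curr moves[j] = true := by unfold condA; simp [hf, h2]
            rw [if_pos h2, ih (j+1) (stack ++ [moves[j]]) (by omega), hdrop]
            generalize List.drop (j+1) moves = tl
            simp [hc, h1']
          · have hc : condA curr moves[j] = false := by
              unfold condA; simp [hf, h1']; simpa using h2
            rw [if_neg h2, hdrop]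
            generalize List.drop (j+1) moves = tl
            simp [hc]
    · rw [dif_neg hj]
      simp [List.drop_eq_nil_of_le (by omega : moves.length ≤ j)]

theorem filter_not_length (p : String → Bool) (l : List String) :
    (l.filter p).length + (l.filter (fun m => !(p m))).length = l.length := by
  induction l with
  | nil => simp
  | cons a l ih => by_cases h : p a <;> simp [h] <;> omega

theorem aOuter_spec (moves : List String) :
    ∀ fuel i acc, moves.length - i ≤ fuel →
      aOuter moves fuel i acc = acc ++ altRef (moves.drop i) := by
  intro fuel
  induction fuel with
  | zero =>
    intro i acc h
    simp only [aOuter]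
    simp [List.drop_eq_nil_of_le (by omega : moves.length ≤ i), altRef]
  | succ n ih =>
    intro i acc h
    simp only [aOuter]
    by_cases hi : i < moves.length
    · have hdrop : moves.drop i = moves[i] :: moves.drop (i+1) := List.drop_eq_getElem_cons hi
      simp only [hi, dif_pos]
      set curr := moves[i] with hcurr
      have hcA : condA (pyHead curr) = condB (pyHead curr) := funext (cond_eq (pyHead curr))
      have hstack := aInner_spec moves (pyHead curr) (moves.length - (i+1)) (i+1) [curr] (by omega)
      rw [hcA] at hstack
      set t := (moves.drop (i+1)).takeWhile (condB (pyHead curr)) with ht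
      set r := (moves.drop (i+1)).dropWhile (condB (pyHead curr)) with hr
      have hlen : (aInner moves (pyHead curr) (moves.length - (i+1)) (i+1) [curr]).length = t.length + 1 := by
        rw [hstack]
        simp only [List.length_append, List.length_reverse, List.length_cons, List.length_nil]
        have := filter_not_length (fun m => pyHead m == pyHead curr) t
        omega
      have htr : moves.drop (i+1) = t ++ r := (List.takeWhile_append_dropWhile).symm
      have hnext : moves.drop (i + (aInner moves (pyHead curr) (moves.length - (i+1)) (i+1) [curr]).length) = r := by
        rw [hlen]
        have : i + (t.length + 1) = (i + 1) + t.length := by omega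
        rw [this, ← List.drop_drop, htr, List.drop_left]
      have htlen : t.length ≤ moves.length - (i+1) := by
        have h1 : t.length ≤ (moves.drop (i+1)).length := (List.takeWhile_sublist _).length_le
        simpa using h1
      rw [ih (i + (aInner moves (pyHead curr) (moves.length - (i+1)) (i+1) [curr]).length) (acc ++ aInner moves (pyHead curr) (moves.length - (i+1)) (i+1) [curr]) (by rw [hlen]; omega)]
      rw [hnext, hstack, hdrop]
      show _ = acc ++ altRef (curr :: moves.drop (i + 1))
      rw [altRef]
      simp only [bEmit, ← ht, ← hr]
      simp [bne]
    · rw [dif_neg hi]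
      simp [List.drop_eq_nil_of_le (by omega : moves.length ≤ i), altRef]

theorem a_eq_altRef (moves : List String) : group_parallel_moves moves = altRef moves := by
  unfold group_parallel_moves
  have := aOuter_spec moves moves.length 0 [] (by omega)
  simpa using this

-- ===== B-side: characterisation of the key list and of the sorted index order =====

-- the key B assigns to a later-run element x = (move, position), run first-face c, group g
def keyOf (span g : Int) (c : Char) (x : String × Nat) : Int :=
  g * span + (if pyHead x.1 == c then -(x.2 : Int) else (x.2 : Int))

-- the key list B's loop builds, described run by run (s = absolute position of the run's first)
def keysSpec (span : Int) : Nat → Int → List String → List Int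
  | _, _, [] => []
  | s, g, first :: rest =>
      (g * span :: ((rest.takeWhile (condB (pyHead first))).zipIdx (s+1)).map (keyOf span g (pyHead first)))
        ++ keysSpec span (s + 1 + (rest.takeWhile (condB (pyHead first))).length) (g + 1)
            (rest.dropWhile (condB (pyHead first)))
termination_by s g l => l.length
decreasing_by
  have := (List.dropWhile_sublist (l := rest) (p := condB (pyHead first))).length_le
  simp; omega

-- the index order B's sort must produce, described run by run
def posSpec : Nat → List String → List Nat
  | _, [] => []
  | s, first :: rest =>
      ((((rest.takeWhile (condB (pyHead first))).zipIdx (s+1)).filter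
          (fun x => pyHead x.1 == pyHead first)).map Prod.snd).reverse
        ++ s :: (((rest.takeWhile (condB (pyHead first))).zipIdx (s+1)).filter
            (fun x => !(pyHead x.1 == pyHead first))).map Prod.snd
        ++ posSpec (s + 1 + (rest.takeWhile (condB (pyHead first))).length)
            (rest.dropWhile (condB (pyHead first)))
termination_by s l => l.length
decreasing_by
  have := (List.dropWhile_sublist (l := rest) (p := condB (pyHead first))).length_le
  simp; omega

theorem foldK (span : Int) :
    ∀ (l : List String) (s : Nat) (g : Int) (keys : List Int) (first : String),
      ((PySem.List.enumerate l ((s : Int) + 1)).foldl (bStepK span) (keys, g, some first)).1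
        = keys ++ ((l.takeWhile (condB (pyHead first))).zipIdx (s+1)).map (keyOf span g (pyHead first))
            ++ keysSpec span (s + 1 + (l.takeWhile (condB (pyHead first))).length) (g + 1)
                (l.dropWhile (condB (pyHead first))) := by
  intro l
  induction l with
  | nil => intro s g keys first; simp [PySem.List.enumerate, keysSpec]
  | cons m l ih =>
    intro s g keys first
    have hen : PySem.List.enumerate (m :: l) ((s : Int) + 1)
        = ((s : Int) + 1, m) :: PySem.List.enumerate l ((s : Int) + 2) := rfl
    rw [hen]
    simp only [List.foldl_cons]
    have h2 : ((s : Int) + 2) = (((s+1 : Nat) : Int)) + 1 := by push_cast; ring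
    by_cases hc : condB (pyHead first) m
    · have hc' : (bAxis (pyHead m) == bAxis (pyHead first)) = true := hc
      have hstep : bStepK span (keys, g, some first) ((s : Int) + 1, m)
          = (keys ++ [g * span + (if pyHead m == pyHead first then -((s : Int)+1) else ((s : Int)+1))],
             g, some first) := by
        simp [bStepK, hc']
      rw [hstep, h2, ih (s+1) g _ first]
      rw [List.takeWhile_cons_of_pos hc, List.dropWhile_cons_of_pos hc]
      simp only [List.zipIdx_cons, List.map_cons, List.length_cons, keyOf]
      have : -((s : Int) + 1) = -(((s+1 : Nat) : Int)) := by push_cast; ring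
      simp only [List.append_assoc, List.cons_append, List.nil_append]
      push_cast
      have h3 : s + 1 + 1 + (List.takeWhile (condB (pyHead first)) l).length
          = s + 1 + ((List.takeWhile (condB (pyHead first)) l).length + 1) := by omega
      rw [h3]
    · have hc' : (bAxis (pyHead m) == bAxis (pyHead first)) = false := by simpa [condB] using hc
      have hstep : bStepK span (keys, g, some first) ((s : Int) + 1, m)
          = (keys ++ [(g + 1) * span], g + 1, some m) := by
        simp [bStepK, hc']
      rw [hstep, h2, ih (s+1) (g+1) _ m]
      rw [List.takeWhile_cons_of_neg (by simpa using hc), List.dropWhile_cons_of_neg (by simpa using hc)]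
      rw [keysSpec]
      simp only [List.map_nil, List.zipIdx_nil, List.append_assoc, List.cons_append,
        List.nil_append, List.length_nil]

theorem keys_eq_keysSpec (moves : List String) (span : Int) :
    ((PySem.List.enumerate moves).foldl (bStepK span) ([], 0, none)).1
      = keysSpec span 0 0 moves := by
  cases moves with
  | nil => simp [PySem.List.enumerate, keysSpec]
  | cons first rest =>
    have hen : PySem.List.enumerate (first :: rest) 0
        = ((0 : Int), first) :: PySem.List.enumerate rest 1 := rfl
    rw [hen]
    simp only [List.foldl_cons]
    have hstep : bStepK span (([] : List Int), (0 : Int), (none : Option String)) ((0 : Int), first)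
        = ([(0 : Int) * span], 0, some first) := by simp [bStepK]
    rw [hstep]
    have h1 : (1 : Int) = ((0 : Nat) : Int) + 1 := by norm_num
    rw [h1, foldK span rest 0 0 _ first, keysSpec]
    simp

theorem posSpec_perm_aux :
    ∀ (N : Nat) (l : List String), l.length ≤ N →
      ∀ (s : Nat), (posSpec s l).Perm (List.range' s l.length) := by
  intro N
  induction N with
  | zero =>
    intro l hl s
    have : l = [] := List.eq_nil_of_length_eq_zero (by omega)
    subst this
    simp [posSpec]
  | succ N ih =>
    intro l hl s
    cases l with
    | nil => simp [posSpec]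
    | cons first rest =>
      rw [posSpec]
      set c := pyHead first with hc
      set t := rest.takeWhile (condB c) with ht
      set r := rest.dropWhile (condB c) with hr
      set z := t.zipIdx (s+1) with hz
      have hsplit : rest.length = t.length + r.length := by
        rw [ht, hr]
        rw [← List.length_append, List.takeWhile_append_dropWhile]
      have hP := ih r (by
        have := (List.dropWhile_sublist (l := rest) (p := condB c)).length_le
        simp only [List.length_cons] at hl
        rw [← hr] at this; omega) (s + 1 + t.length)
      have hAB : (((z.filter (fun x => pyHead x.1 == c)).map Prod.snd)
            ++ ((z.filter (fun x => !(pyHead x.1 == c))).map Prod.snd)).Perm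
          (List.range' (s+1) t.length) := by
        rw [← List.map_append]
        have h1 := List.filter_append_perm (fun x => pyHead x.1 == c) z
        have h2 := h1.map Prod.snd
        rw [hz, List.zipIdx_map_snd] at h2
        exact h2
      have hrange : List.range' s ((first :: rest).length)
          = s :: (List.range' (s+1) t.length ++ List.range' (s+1+t.length) r.length) := by
        simp only [List.length_cons, hsplit]
        rw [List.range'_succ]
        congr 1
        have h3 := List.range'_append (s := s+1) (m := t.length) (n := r.length) (step := 1)
        simp only [one_mul] at h3
        rw [← h3]
      rw [hrange]
      simp only [List.append_assoc, List.cons_append]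
      refine (List.perm_middle).trans (List.Perm.cons s ?_)
      have h4 : ((((z.filter (fun x => pyHead x.1 == c)).map Prod.snd).reverse)
            ++ (((z.filter (fun x => !(pyHead x.1 == c))).map Prod.snd)
              ++ posSpec (s + 1 + t.length) r)).Perm
          (((z.filter (fun x => pyHead x.1 == c)).map Prod.snd
            ++ ((z.filter (fun x => !(pyHead x.1 == c))).map Prod.snd))
              ++ posSpec (s + 1 + t.length) r) := by
        rw [List.append_assoc]
        exact List.Perm.append (List.reverse_perm _) (List.Perm.refl _)
      exact h4.trans (List.Perm.append hAB hP)

theorem posSpec_perm : ∀ (l : List String) (s : Nat), (posSpec s l).Perm (List.range' s l.length) := by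
  intro l s
  exact posSpec_perm_aux l.length l (le_refl _) s

theorem posSpec_pairwise (n : Nat) (span : Int) (hspan : span = 2 * (n : Int) + 1) :
    ∀ (N : Nat) (l : List String), l.length ≤ N →
      ∀ (s : Nat) (g : Int) (acc : List Int), acc.length = s → s + l.length ≤ n →
        (∀ p ∈ posSpec s l, p < n ∧
            g * span - (n : Int) < PySem.List.pyGetD (acc ++ keysSpec span s g l) (p : Int) 0)
        ∧ List.Pairwise (fun (a b : Nat) =>
            PySem.List.pyGetD (acc ++ keysSpec span s g l) (a : Int) 0
              < PySem.List.pyGetD (acc ++ keysSpec span s g l) (b : Int) 0) (posSpec s l) := by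
  intro N
  induction N with
  | zero =>
    intro l hl s g acc hs hn
    have : l = [] := List.eq_nil_of_length_eq_zero (by omega)
    subst this
    constructor
    · intro p hp; simp [posSpec] at hp
    · simp [posSpec]
  | succ N ih =>
    intro l hl s g acc hs hn
    cases l with
    | nil =>
      constructor
      · intro p hp; simp [posSpec] at hp
      · simp [posSpec]
    | cons first rest =>
      rw [posSpec, keysSpec]
      set c := pyHead first with hc
      set t := rest.takeWhile (condB c) with ht
      set r := rest.dropWhile (condB c) with hr
      set z := t.zipIdx (s+1) with hz
      have htlen : t.length ≤ rest.length := by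
        rw [ht]; exact (List.takeWhile_sublist _).length_le
      have hrlen : r.length ≤ rest.length := by
        rw [hr]; exact (List.dropWhile_sublist _).length_le
      have hL : (first :: rest).length = rest.length + 1 := by simp
      -- the full key list, re-associated so the tail run matches the IH's shape
      simp only [List.append_assoc, List.cons_append]
      set block : List Int := g * span :: z.map (keyOf span g c) with hblock
      have hKassoc : acc ++ (g * span :: (z.map (keyOf span g c) ++ keysSpec span (s + 1 + t.length) (g + 1) r))
          = (acc ++ block) ++ keysSpec span (s + 1 + t.length) (g + 1) r := by
        rw [hblock, List.append_assoc]
        simp only [List.cons_append]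
      rw [hKassoc]
      have hblen : (acc ++ block).length = s + 1 + t.length := by
        have : z.length = t.length := by rw [hz]; simp
        simp [hblock, hs, this]; omega
      set K := (acc ++ block) ++ keysSpec span (s + 1 + t.length) (g + 1) r with hK
      -- key value at the run's first position
      have kv0 : PySem.List.pyGetD K (s : Int) 0 = g * span := by
        rw [PySem.List.pyGetD_natCast, hK, List.append_assoc,
          List.getD_append_right _ _ _ _ (by omega : acc.length ≤ s), hs]
        simp [hblock]
      -- key value at a later run position
      have kvx : ∀ x ∈ z, PySem.List.pyGetD K (x.2 : Int) 0 = keyOf span g c x := by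
        intro x hx
        rcases x with ⟨a, i⟩
        have hmem := List.mem_zipIdx (by rw [← hz]; exact hx)
        rcases hmem with ⟨h1, h2, h3⟩
        rw [PySem.List.pyGetD_natCast, hK, List.append_assoc,
          List.getD_append_right _ _ _ _ (by omega : acc.length ≤ i), hs]
        have hki : i - s = (i - s - 1) + 1 := by omega
        rw [hki]
        simp only [hblock, List.cons_append, List.getD_cons_succ]
        rcases List.getElem_of_mem hx with ⟨j, hj, hjz⟩
        have hjz2 : (t[j]'(by rw [hz] at hj; simpa using hj), s + 1 + j) = (a, i) := by
          rw [← hjz]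
          simp [hz, List.getElem_zipIdx]
        have hji : i = s + 1 + j := by
          have := congrArg Prod.snd hjz2; simpa using this.symm
        have hlt : i - s - 1 < (z.map (keyOf span g c)).length := by
          simp only [List.length_map]; omega
        rw [List.getD_append _ _ _ _ hlt, List.getD_eq_getElem _ _ hlt]
        simp only [List.getElem_map]
        have hidx : i - s - 1 = j := by omega
        have hzel : z[i - s - 1]'(by simpa using hlt) = (a, i) := by
          have : z[i - s - 1]'(by simpa using hlt) = z[j]'hj := by
            congr 1
          rw [this, hjz]
        rw [hzel]
      -- membership descriptions of the two filtered parts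
      have hA1 : ∀ q ∈ (z.filter (fun x => pyHead x.1 == c)).map Prod.snd,
          s + 1 ≤ q ∧ q ≤ s + t.length ∧ PySem.List.pyGetD K (q : Int) 0 = g * span - q := by
        intro q hq
        rcases List.mem_map.mp hq with ⟨x, hxf, hxq⟩
        have hxz := List.mem_of_mem_filter hxf
        have hps := (List.mem_filter.mp hxf).2
        rcases x with ⟨a, i⟩
        have hmem := List.mem_zipIdx (by rw [← hz]; exact hxz)
        rcases hmem with ⟨h1, h2, _⟩
        subst hxq
        refine ⟨h1, by omega, ?_⟩
        rw [kvx _ hxz]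
        simp only [keyOf, hps, if_pos]
        ring
      have hA2 : ∀ q ∈ (z.filter (fun x => !(pyHead x.1 == c))).map Prod.snd,
          s + 1 ≤ q ∧ q ≤ s + t.length ∧ PySem.List.pyGetD K (q : Int) 0 = g * span + q := by
        intro q hq
        rcases List.mem_map.mp hq with ⟨x, hxf, hxq⟩
        have hxz := List.mem_of_mem_filter hxf
        have hps := (List.mem_filter.mp hxf).2
        rcases x with ⟨a, i⟩
        have hmem := List.mem_zipIdx (by rw [← hz]; exact hxz)
        rcases hmem with ⟨h1, h2, _⟩
        subst hxq
        refine ⟨h1, by omega, ?_⟩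
        rw [kvx _ hxz]
        simp only [keyOf]
        rw [if_neg (by simpa using hps)]
      -- the induction hypothesis for the remaining runs
      have hIH := ih r (by simp only [List.length_cons] at hl; omega)
        (s + 1 + t.length) (g + 1) (acc ++ block) hblen
        (by
          have hsplit : rest.length = t.length + r.length := by
            rw [ht, hr, ← List.length_append, List.takeWhile_append_dropWhile]
          simp only [List.length_cons] at hn; omega)
      rw [← hK] at hIH
      rcases hIH with ⟨ihB, ihP⟩
      have hspan' : (g + 1) * span - (n : Int) = g * span + (n : Int) + 1 := by
        rw [hspan]; ring
      have hsn : s + 1 + t.length ≤ n := by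
        have hsplit : rest.length = t.length + r.length := by
          rw [ht, hr, ← List.length_append, List.takeWhile_append_dropWhile]
        simp only [List.length_cons] at hn; omega
      -- strict snd-ordering of the run's indexed tail
      have hzp : List.Pairwise (fun x y : String × Nat => x.2 < y.2) z := by
        have hp1 : List.Pairwise (· < ·) (z.map Prod.snd) := by
          rw [hz, List.zipIdx_map_snd]
          exact List.pairwise_lt_range' 1
        exact List.pairwise_map.mp hp1
      constructor
      · -- bounds
        intro p hp
        rcases List.mem_append.mp hp with h | h'
        · rcases hA1 p (List.mem_reverse.mp h) with ⟨hq1, hq2, hq3⟩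
          refine ⟨by omega, ?_⟩
          rw [hq3]
          have : (p : Int) < (n : Int) := by exact_mod_cast (by omega : p < n)
          linarith
        · rcases List.mem_cons.mp h' with h | h
          · subst h
            refine ⟨by omega, ?_⟩
            rw [kv0]
            have : (0 : Int) < (n : Int) := by exact_mod_cast (by omega : 0 < n)
            linarith
          rcases List.mem_append.mp h with h | h
          · rcases hA2 p h with ⟨hq1, hq2, hq3⟩
            refine ⟨by omega, ?_⟩
            rw [hq3]
            have : (0 : Int) < (p : Int) := by exact_mod_cast (by omega : 0 < p)
            linarith
          · rcases ihB p h with ⟨hq1, hq2⟩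
            refine ⟨hq1, ?_⟩
            rw [hspan'] at hq2
            have : (0 : Int) ≤ (n : Int) := by exact_mod_cast (Nat.zero_le n)
            linarith
      · -- pairwise strict key order
        rw [List.pairwise_append]
        refine ⟨?_, ?_, ?_⟩
        · -- within the reversed same-face part
          rw [List.pairwise_reverse, List.pairwise_map]
          refine List.Pairwise.imp_of_mem ?_ (hzp.filter _)
          intro x y hx hy hlt
          have hx2 := hA1 x.2 (List.mem_map_of_mem hx)
          have hy2 := hA1 y.2 (List.mem_map_of_mem hy)
          rw [hx2.2.2, hy2.2.2]
          have : (x.2 : Int) < (y.2 : Int) := by exact_mod_cast hlt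
          linarith
        · -- within first :: opposite ++ rest-runs
          rw [List.pairwise_cons]
          constructor
          · intro b hb
            rw [kv0]
            rcases List.mem_append.mp hb with h | h
            · rcases hA2 b h with ⟨hq1, hq2, hq3⟩
              rw [hq3]
              have : (0 : Int) < (b : Int) := by exact_mod_cast (by omega : 0 < b)
              linarith
            · have := (ihB b h).2
              rw [hspan'] at this
              have h0 : (0 : Int) ≤ (n : Int) := by exact_mod_cast (Nat.zero_le n)
              linarith
          · rw [List.pairwise_append]
            refine ⟨?_, ihP, ?_⟩
            · rw [List.pairwise_map]
              refine List.Pairwise.imp_of_mem ?_ (hzp.filter _)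
              intro x y hx hy hlt
              have hx2 := hA2 x.2 (List.mem_map_of_mem hx)
              have hy2 := hA2 y.2 (List.mem_map_of_mem hy)
              rw [hx2.2.2, hy2.2.2]
              have : (x.2 : Int) < (y.2 : Int) := by exact_mod_cast hlt
              linarith
            · intro a ha b hb
              rcases hA2 a ha with ⟨hq1, hq2, hq3⟩
              have hbb := (ihB b hb).2
              rw [hspan'] at hbb
              rw [hq3]
              have : (a : Int) < (n : Int) := by exact_mod_cast (by omega : a < n)
              linarith
        · -- reversed same-face part precedes everything else
          intro a ha b hb
          rcases hA1 a (List.mem_reverse.mp ha) with ⟨hq1, hq2, hq3⟩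
          rw [hq3]
          have ha0 : (0 : Int) < (a : Int) := by exact_mod_cast (by omega : 0 < a)
          rcases List.mem_cons.mp hb with h | h
          · subst h
            rw [kv0]; linarith
          · rcases List.mem_append.mp h with h2 | h2
            · rcases hA2 b h2 with ⟨hb1, hb2, hb3⟩
              rw [hb3]
              have : (0 : Int) < (b : Int) := by exact_mod_cast (by omega : 0 < b)
              linarith
            · have := (ihB b h2).2
              rw [hspan'] at this
              have h0 : (0 : Int) ≤ (n : Int) := by exact_mod_cast (Nat.zero_le n)
              linarith

theorem mapOut (moves : List String) :
    ∀ (N : Nat) (l : List String), l.length ≤ N →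
      ∀ (s : Nat) (accm : List String), accm.length = s → moves = accm ++ l →
        (posSpec s l).map (fun p => moves.getD p "") = altRef l := by
  intro N
  induction N with
  | zero =>
    intro l hl s accm hs hm
    have : l = [] := List.eq_nil_of_length_eq_zero (by omega)
    subst this
    simp [posSpec, altRef]
  | succ N ih =>
    intro l hl s accm hs hm
    cases l with
    | nil => simp [posSpec, altRef]
    | cons first rest =>
      rw [posSpec]
      set c := pyHead first with hc
      set t := rest.takeWhile (condB c) with ht
      set r := rest.dropWhile (condB c) with hr
      set z := t.zipIdx (s+1) with hz
      have htr : rest = t ++ r := by rw [ht, hr, List.takeWhile_append_dropWhile]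
      have hmoves : moves = accm ++ first :: (t ++ r) := by rw [hm, ← htr]
      have hget : ∀ x ∈ z, moves.getD x.2 "" = x.1 := by
        intro x hx
        rcases x with ⟨a, i⟩
        have hmem := List.mem_zipIdx (by rw [← hz]; exact hx)
        rcases hmem with ⟨h1, h2, h3⟩
        have hi : accm.length ≤ i := by omega
        rw [hmoves, List.getD_append_right _ _ _ _ hi, hs]
        have hk : i - s = (i - s - 1) + 1 := by omega
        rw [hk]
        simp only [List.getD_cons_succ]
        have hlt : i - s - 1 < t.length := by omega
        rw [List.getD_append _ _ _ _ hlt, List.getD_eq_getElem _ _ hlt, h3]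
        simp [Nat.sub_sub]
      have hfs : moves.getD s "" = first := by
        rw [hmoves, List.getD_append_right _ _ _ _ (by omega : accm.length ≤ s), hs]
        simp
      have hsameMap : ((z.filter (fun x => pyHead x.1 == c)).map Prod.snd).map (fun p => moves.getD p "")
          = t.filter (fun m => pyHead m == c) := by
        rw [List.map_map]
        have e1 : (z.filter (fun x => pyHead x.1 == c)).map ((fun p => moves.getD p "") ∘ Prod.snd)
            = (z.filter (fun x => pyHead x.1 == c)).map Prod.fst :=
          List.map_congr_left (fun x hx => hget x (List.mem_of_mem_filter hx))
        rw [e1, hz]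
        have e2 := List.filter_map (f := Prod.fst (α := String) (β := Nat))
          (p := fun m => pyHead m == c) (l := t.zipIdx (s+1))
        rw [List.zipIdx_map_fst] at e2
        simpa [Function.comp] using e2.symm
      have hoppMap : ((z.filter (fun x => !(pyHead x.1 == c))).map Prod.snd).map (fun p => moves.getD p "")
          = t.filter (fun m => !(pyHead m == c)) := by
        rw [List.map_map]
        have e1 : (z.filter (fun x => !(pyHead x.1 == c))).map ((fun p => moves.getD p "") ∘ Prod.snd)
            = (z.filter (fun x => !(pyHead x.1 == c))).map Prod.fst :=
          List.map_congr_left (fun x hx => hget x (List.mem_of_mem_filter hx))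
        rw [e1, hz]
        have e2 := List.filter_map (f := Prod.fst (α := String) (β := Nat))
          (p := fun m => !(pyHead m == c)) (l := t.zipIdx (s+1))
        rw [List.zipIdx_map_fst] at e2
        simpa [Function.comp] using e2.symm
      have hrlen : r.length ≤ N := by
        have := (List.dropWhile_sublist (l := rest) (p := condB c)).length_le
        simp only [List.length_cons] at hl
        rw [← hr] at this; omega
      have hIH := ih r hrlen (s + 1 + t.length) (accm ++ first :: t)
        (by simp [hs]; omega) (by rw [hmoves]; simp)
      rw [altRef]
      simp only [List.map_append, List.map_reverse, List.map_cons]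
      rw [hsameMap, hoppMap, hfs, hIH]
      simp only [bEmit, ← hc, ← ht, ← hr, bne]

theorem alt_eq_altRef (moves : List String) : group_parallel_moves_alt moves = altRef moves := by
  show (PySem.List.sorted (PySem.List.pyRange 0 (moves.length : Int))
      (fun q => PySem.List.pyGetD
        ((PySem.List.enumerate moves).foldl (bStepK (2 * (moves.length : Int) + 1)) ([], 0, none)).1 q 0)).map
      (fun q => PySem.List.pyGetD moves q "") = altRef moves
  rw [keys_eq_keysSpec moves (2 * (moves.length : Int) + 1)]
  have hpair := (posSpec_pairwise moves.length (2 * (moves.length : Int) + 1) rfl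
    moves.length moves (le_refl _) 0 0 [] rfl (by omega)).2
  simp only [List.nil_append] at hpair
  have hpw : List.Pairwise (fun a b : Int =>
      PySem.List.pyGetD (keysSpec (2 * (moves.length : Int) + 1) 0 0 moves) a 0
        < PySem.List.pyGetD (keysSpec (2 * (moves.length : Int) + 1) 0 0 moves) b 0)
      ((posSpec 0 moves).map (fun p : Nat => (p : Int))) := by
    rw [List.pairwise_map]
    exact hpair
  have hperm : ((posSpec 0 moves).map (fun p : Nat => (p : Int))).Perm
      (PySem.List.pyRange 0 (moves.length : Int)) := by
    rw [PySem.List.pyRange_zero_natCast]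
    refine List.Perm.map _ ?_
    have := posSpec_perm moves 0
    rwa [← List.range_eq_range'] at this
  rw [PySem.List.sorted_eq_of_perm_of_pairwise_lt _ _ _ hperm hpw]
  rw [List.map_map]
  have hmap : (posSpec 0 moves).map ((fun q => PySem.List.pyGetD moves q "") ∘ (fun p : Nat => (p : Int)))
      = (posSpec 0 moves).map (fun p => moves.getD p "") := by
    refine List.map_congr_left ?_
    intro p _
    simp [Function.comp, PySem.List.pyGetD_natCast]
  rw [hmap]
  exact mapOut moves moves.length moves (le_refl _) 0 [] rfl rfl

-- ===== VERDICT (by name: the statement is the Claim_ definition above) =====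
theorem group_parallel_moves_spec : Claim_equal_group_parallel_moves := by
  intro moves _ _
  unfold Spec_group_parallel_moves
  rw [a_eq_altRef, alt_eq_altRef]

theorem group_parallel_moves_raises : Claim_raises_group_parallel_moves := by
  unfold Claim_raises_group_parallel_moves
  constructor
  · intro moves _ hr hp
    rcases hr with ⟨h2, _, hnp⟩
    rcases hp with h1 | ⟨_, hpw⟩
    · omega
    · exact hnp hpw
  · exact ⟨by decide, by decide, by decide⟩

-- self-check: the raise-region witness facts recorded above, extracted from the claim
theorem pvRaiseWitness_ok :
    Raises_group_parallel_moves pvRaiseWitness_group_parallel_moves ∧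
      group_parallel_moves_alt pvRaiseWitness_group_parallel_moves
        = pvRaiseWitnessOut_group_parallel_moves := by
  have h := group_parallel_moves_raises
  unfold Claim_raises_group_parallel_moves at h
  exact ⟨h.2.2.1, h.2.2.2⟩
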